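-- pv_equiv track=rewrite | github.com/voorloopnul/decouphage | validation/compare.py | count_enzyme_occurrences
-- ===== SOURCE A (Python) =====
-- word_of_interest = [
--     "endonuclease",
--     "exonuclease",
--     "helicase",
--     "hydrolase",
--     "kinase",
--     "ligase",
--     "methyltransferase",
--     "polymerase",
--     "primase",
--     "protease",
--     "recombinase",
--     "reductase",
--     "synthase",
--     "terminase",
--     "transferase",
--     "hypothetical protein",
-- ]
--
-- def count_enzyme_occurrences(decouphage_list, rast_list):
--     d_list, r_list, a_list = [], [], []
--     for word in word_of_interest:
--         d_count, r_count, a_count = 0, 0, 0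
--
--         for d, r in zip(decouphage_list, rast_list):
--             # count enzyme occurrence in Decouphage
--             d_count += 1 if word in d.lower() else 0
--             # count enzyme occurrence in rast
--             r_count += 1 if word in r.lower() else 0
--             # count enzyme occurrence agreement
--             a_count += 1 if word in d.lower() and word in r.lower() else 0
--
--         d_list.append(d_count)
--         r_list.append(r_count)
--         a_list.append(a_count)
--     return d_list, r_list, a_list
-- ===== SOURCE B (Python) =====
-- word_of_interest = [
--     "endonuclease",
--     "exonuclease",
--     "helicase",
--     "hydrolase",
--     "kinase",
--     "ligase",
--     "methyltransferase",
--     "polymerase",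
--     "primase",
--     "protease",
--     "recombinase",
--     "reductase",
--     "synthase",
--     "terminase",
--     "transferase",
--     "hypothetical protein",
-- ]
--
--
-- def _hits(text):
--     """Set of indices of the keywords that occur in text (case-insensitive)."""
--     low = text.lower()
--     return {i for i, w in enumerate(word_of_interest) if w in low}
--
--
-- def count_enzyme_occurrences(decouphage_list, rast_list):
--     # Stage 1: turn the documents into streams of hit events (keyword indices);
--     # an agreement event is the set intersection of the two hit sets of a pair.
--     d_events, r_events, a_events = [], [], []
--     for d, r in zip(decouphage_list, rast_list):
--         hd, hr = _hits(d), _hits(r)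
--         d_events.extend(hd)
--         r_events.extend(hr)
--         a_events.extend(hd & hr)
--     # Stage 2: read each per-keyword count off its event stream.
--     n = len(word_of_interest)
--     return (
--         [d_events.count(i) for i in range(n)],
--         [r_events.count(i) for i in range(n)],
--         [a_events.count(i) for i in range(n)],
--     )
-- ===== Notes on version B (the rewrite author's own statement) =====
-- stated objective: alternative
-- what changed: B maps each document pair to the SET of keyword indices occurring in it (agreement = set intersection of the two hit sets), concatenates these hit events into three streams, and only afterwards reads each per-keyword count off its stream with list.count, instead of A's 16 per-keyword rescans of both lists with boolean tests and running counters.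
import Mathlib
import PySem

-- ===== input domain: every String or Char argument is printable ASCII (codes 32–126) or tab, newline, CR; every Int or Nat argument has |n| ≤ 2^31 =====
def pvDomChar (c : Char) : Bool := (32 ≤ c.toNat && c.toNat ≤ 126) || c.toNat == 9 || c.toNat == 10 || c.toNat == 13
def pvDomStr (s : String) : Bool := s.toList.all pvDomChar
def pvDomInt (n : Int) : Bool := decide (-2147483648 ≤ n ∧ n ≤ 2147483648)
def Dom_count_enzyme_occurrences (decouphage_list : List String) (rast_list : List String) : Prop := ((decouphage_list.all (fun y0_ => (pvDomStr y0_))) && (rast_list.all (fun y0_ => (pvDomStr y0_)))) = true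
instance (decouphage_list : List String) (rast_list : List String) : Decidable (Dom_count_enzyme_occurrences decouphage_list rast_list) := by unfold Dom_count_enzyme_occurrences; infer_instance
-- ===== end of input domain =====

-- B replaces A's 16 per-keyword rescans by a hit-event decomposition: each pair of
-- documents is mapped to two sets of matching keyword indices (agreement = their
-- intersection), the events are concatenated into three streams, and the counts are
-- read off the streams afterwards (objective: alternative; return value proved equal).

def word_of_interest : List String :=
  ["endonuclease", "exonuclease", "helicase", "hydrolase", "kinase", "ligase",
   "methyltransferase", "polymerase", "primase", "protease", "recombinase",
   "reductase", "synthase", "terminase", "transferase", "hypothetical protein"]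

-- ===== PORT A =====
-- A: for each word, scan zip(decouphage_list, rast_list) accumulating three counts,
-- then append them to the three output lists.
def count_enzyme_occurrences (decouphage_list : List String) (rast_list : List String) : List Int × List Int × List Int :=
  word_of_interest.foldl
    (fun (acc : List Int × List Int × List Int) (word : String) =>
      let c := (decouphage_list.zip rast_list).foldl
        (fun (t : Int × Int × Int) (pr : String × String) =>
          (t.1 + (if PySem.Str.isIn word (PySem.Str.lower pr.1) then 1 else 0),
           t.2.1 + (if PySem.Str.isIn word (PySem.Str.lower pr.2) then 1 else 0),
           t.2.2 + (if PySem.Str.isIn word (PySem.Str.lower pr.1) && PySem.Str.isIn word (PySem.Str.lower pr.2) then 1 else 0)))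
        (0, 0, 0)
      (acc.1 ++ [c.1], acc.2.1 ++ [c.2.1], acc.2.2 ++ [c.2.2]))
    ([], [], [])

-- ===== PORT B =====
-- B helper _hits: the set of indices of the keywords occurring in text.lower()
-- (the Python set comprehension over enumerate(word_of_interest)).
def hits (text : String) : List Int :=
  let low := PySem.Str.lower text
  PySem.Set.ofList
    (((PySem.List.enumerate word_of_interest 0).filter
        (fun p => PySem.Str.isIn p.2 low)).map (fun p => p.1))

-- B: one pass over the zipped pairs extending three event streams (hd, hr, hd & hr),
-- then the per-keyword counts are read off with list.count over range(n).
def count_enzyme_occurrences_alt (decouphage_list : List String) (rast_list : List String) : List Int × List Int × List Int :=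
  let st := (decouphage_list.zip rast_list).foldl
    (fun (st : List Int × List Int × List Int) (pr : String × String) =>
      let hd := hits pr.1
      let hr := hits pr.2
      (st.1 ++ hd, st.2.1 ++ hr, st.2.2 ++ PySem.Set.inter hd hr))
    ([], [], [])
  ((PySem.List.pyRange 0 (word_of_interest.length : Int) 1).map (fun i => (st.1.count i : Int)),
   (PySem.List.pyRange 0 (word_of_interest.length : Int) 1).map (fun i => (st.2.1.count i : Int)),
   (PySem.List.pyRange 0 (word_of_interest.length : Int) 1).map (fun i => (st.2.2.count i : Int)))

-- ===== PRECONDITION & SPEC =====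
def Spec_count_enzyme_occurrences (decouphage_list : List String) (rast_list : List String) (out : List Int × List Int × List Int) : Prop := out = count_enzyme_occurrences_alt decouphage_list rast_list
instance (decouphage_list : List String) (rast_list : List String) (out : List Int × List Int × List Int) : Decidable (Spec_count_enzyme_occurrences decouphage_list rast_list out) := by unfold Spec_count_enzyme_occurrences; infer_instance

-- ===== CLAIM =====
def Claim_equal_count_enzyme_occurrences : Prop := ∀ (decouphage_list : List String) (rast_list : List String), Dom_count_enzyme_occurrences decouphage_list rast_list → Spec_count_enzyme_occurrences decouphage_list rast_list (count_enzyme_occurrences decouphage_list rast_list)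

-- ===== LEMMAS AND PROOFS =====

-- A's inner fold over the pairs computes the three countP values.
theorem a_inner_eq (word : String) (pairs : List (String × String)) (x y z : Int) :
    pairs.foldl
      (fun (t : Int × Int × Int) (pr : String × String) =>
        (t.1 + (if PySem.Str.isIn word (PySem.Str.lower pr.1) then 1 else 0),
         t.2.1 + (if PySem.Str.isIn word (PySem.Str.lower pr.2) then 1 else 0),
         t.2.2 + (if PySem.Str.isIn word (PySem.Str.lower pr.1) && PySem.Str.isIn word (PySem.Str.lower pr.2) then 1 else 0)))
      (x, y, z)
    = (x + (pairs.countP (fun pr => PySem.Str.isIn word (PySem.Str.lower pr.1)) : Int),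
       y + (pairs.countP (fun pr => PySem.Str.isIn word (PySem.Str.lower pr.2)) : Int),
       z + (pairs.countP (fun pr => PySem.Str.isIn word (PySem.Str.lower pr.1) && PySem.Str.isIn word (PySem.Str.lower pr.2)) : Int)) := by
  induction pairs generalizing x y z with
  | nil => simp
  | cons p ps ih =>
    simp only [List.foldl_cons, ih, List.countP_cons]
    refine Prod.ext ?_ (Prod.ext ?_ ?_) <;> (split_ifs <;> push_cast <;> ring)

-- A's outer fold over the words appends one triple per word.
theorem a_outer_eq (ws : List String) (f g h : String → Int) (xs ys zs : List Int) :
    ws.foldl (fun (acc : List Int × List Int × List Int) (w : String) =>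
        (acc.1 ++ [f w], acc.2.1 ++ [g w], acc.2.2 ++ [h w])) (xs, ys, zs)
    = (xs ++ ws.map f, ys ++ ws.map g, zs ++ ws.map h) := by
  induction ws generalizing xs ys zs with
  | nil => simp
  | cons w ws ih => simp [ih]

-- B's triple-state fold splits into three independent append folds (= flatMaps).
theorem b_fold_split (pairs : List (String × String)) (d r a : List Int) :
    pairs.foldl
      (fun (st : List Int × List Int × List Int) (pr : String × String) =>
        let hd := hits pr.1
        let hr := hits pr.2
        (st.1 ++ hd, st.2.1 ++ hr, st.2.2 ++ PySem.Set.inter hd hr))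
      (d, r, a)
    = (d ++ pairs.flatMap (fun pr => hits pr.1),
       r ++ pairs.flatMap (fun pr => hits pr.2),
       a ++ pairs.flatMap (fun pr => PySem.Set.inter (hits pr.1) (hits pr.2))) := by
  induction pairs generalizing d r a with
  | nil => simp
  | cons p ps ih => simp [ih]

theorem nodup_hits (s : String) : (hits s).Nodup := PySem.Set.nodup_ofList _

-- counting one value in a concatenation of nodup event blocks = counting the
-- blocks containing it.
theorem count_flatMap_nodup (pairs : List (String × String)) (h : String × String → List Int)
    (hnd : ∀ p, (h p).Nodup) (i : Int) :
    (pairs.flatMap h).count i = pairs.countP (fun p => decide (i ∈ h p)) := by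
  induction pairs with
  | nil => simp
  | cons p ps ih =>
    simp only [List.flatMap_cons, List.count_append, ih, List.countP_cons]
    by_cases hm : i ∈ h p
    · simp [hm, List.count_eq_one_of_mem (hnd p) hm, Nat.add_comm]
    · simp [hm, List.count_eq_zero_of_not_mem hm]

-- membership in the hit set of a document = the k-th keyword occurs in it.
theorem mem_hits (s : String) (k : Nat) (hk : k < word_of_interest.length) :
    ((k : Int) ∈ hits s) ↔ PySem.Str.isIn word_of_interest[k] (PySem.Str.lower s) = true := by
  simp only [hits, PySem.Set.mem_ofList, List.mem_map, List.mem_filter,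
    PySem.List.mem_enumerate_iff]
  constructor
  · rintro ⟨p, ⟨⟨k', hk', rfl⟩, hp⟩, hfst⟩
    simp only [zero_add] at hfst
    obtain rfl : k' = k := by exact_mod_cast hfst
    exact hp
  · intro hq
    exact ⟨((k : Int), word_of_interest[k]), ⟨⟨k, hk, by simp⟩, hq⟩, rfl⟩

-- ===== VERDICT =====
theorem count_enzyme_occurrences_spec : Claim_equal_count_enzyme_occurrences := by
  intro dl rl _
  show count_enzyme_occurrences dl rl = count_enzyme_occurrences_alt dl rl
  unfold count_enzyme_occurrences count_enzyme_occurrences_alt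
  simp only [a_inner_eq]
  rw [a_outer_eq word_of_interest _ _ _ [] [] [], b_fold_split]
  simp only [List.nil_append, zero_add]
  have hrange : PySem.List.pyRange 0 (word_of_interest.length : Int) 1
      = (List.range word_of_interest.length).map Int.ofNat := by decide
  rw [hrange]
  have key : ∀ (h : String × String → List Int) (f : String → String × String → Bool),
      (∀ p, (h p).Nodup) →
      (∀ (k : Nat) (hk : k < word_of_interest.length) (p : String × String),
        ((k : Int) ∈ h p) ↔ f word_of_interest[k] p = true) →
      word_of_interest.map (fun w => ((dl.zip rl).countP (f w) : Int))
        = ((List.range word_of_interest.length).map Int.ofNat).map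
            (fun i => (((dl.zip rl).flatMap h).count i : Int)) := by
    intro h f hnd hmem
    apply List.ext_getElem (by simp)
    intro k hk1 hk2
    have hk : k < word_of_interest.length := by simpa using hk1
    simp only [List.getElem_map, List.getElem_range]
    rw [count_flatMap_nodup _ h hnd]
    congr 1
    apply List.countP_congr
    intro pr _
    simp only [decide_eq_true_eq]
    exact (hmem k hk pr).symm
  refine Prod.ext ?_ (Prod.ext ?_ ?_)
  · exact key (fun pr => hits pr.1)
      (fun w pr => PySem.Str.isIn w (PySem.Str.lower pr.1))
      (fun p => nodup_hits _) (fun k hk p => mem_hits _ k hk)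
  · exact key (fun pr => hits pr.2)
      (fun w pr => PySem.Str.isIn w (PySem.Str.lower pr.2))
      (fun p => nodup_hits _) (fun k hk p => mem_hits _ k hk)
  · exact key (fun pr => PySem.Set.inter (hits pr.1) (hits pr.2))
      (fun w pr => PySem.Str.isIn w (PySem.Str.lower pr.1) && PySem.Str.isIn w (PySem.Str.lower pr.2))
      (fun p => PySem.Set.nodup_inter _ _ (nodup_hits _))
      (fun k hk p => by
        rw [PySem.Set.mem_inter]
        simp only [Bool.and_eq_true]
        exact and_congr (mem_hits _ k hk) (mem_hits _ k hk))
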